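-- pv_equiv track=rewrite | github.com/silverain27/algorithm | 프로그래머스/1/42576. 완주하지 못한 선수/완주하지 못한 선수.py | solution
-- ===== SOURCE A (Python) =====
-- def solution(participants, completions):
--     maraton = {}
--     for part in participants:
--         if part not in maraton:
--             maraton[part] = 1
--         else:
--             maraton[part] +=1
--     for compl in completions:
--         if compl in maraton:
--             maraton[compl] -=1
--     for key,value in maraton.items():
--         if value != 0:
--             return key
-- ===== SOURCE B (Python) =====
-- def solution(participants, completions):
--     for part in participants:
--         if participants.count(part) != completions.count(part):
--             return part
-- ===== Notes on version B (the rewrite author's own statement) =====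
-- stated objective: simpler
-- what changed: B drops A's three dict-building passes entirely and instead scans participants once, returning the first name whose participants.count differs from completions.count (counts of equal names agree, so the first mismatching occurrence is exactly A's first nonzero dict key).
-- outside the precondition, e.g. on solution(['a'], ['a']): A returns None, B returns None
import Mathlib
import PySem

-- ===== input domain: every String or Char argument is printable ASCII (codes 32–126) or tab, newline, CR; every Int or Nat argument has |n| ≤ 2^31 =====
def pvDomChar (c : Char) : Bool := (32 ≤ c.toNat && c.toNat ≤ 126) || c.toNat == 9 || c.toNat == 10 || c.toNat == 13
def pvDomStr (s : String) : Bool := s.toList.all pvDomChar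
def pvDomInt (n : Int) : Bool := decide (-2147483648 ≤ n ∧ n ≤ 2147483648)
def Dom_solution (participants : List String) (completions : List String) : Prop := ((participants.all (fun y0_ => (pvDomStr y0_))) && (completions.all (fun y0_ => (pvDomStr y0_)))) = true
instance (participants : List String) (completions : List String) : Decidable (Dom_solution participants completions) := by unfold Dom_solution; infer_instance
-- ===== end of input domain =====

-- B replaces A's dict-counting passes with a single scan comparing list counts; objective: simpler.

-- ===== PORT A =====
def solution (participants : List String) (completions : List String) : String :=
  let maraton : PySem.Dict String Int :=
    participants.foldl (fun d part =>
      if d.contains part = false then d.insert part 1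
      else d.insert part (d.getD part 0 + 1)) PySem.Dict.empty
  let maraton :=
    completions.foldl (fun d compl =>
      if d.contains compl then d.insert compl (d.getD compl 0 - 1) else d) maraton
  -- Python returns the first key with nonzero value; when none exists it returns None,
  -- which is excluded by Pre_solution ("" stands in for the excluded fall-through)
  ((maraton.items.find? (fun kv => kv.2 != 0)).map Prod.fst).getD ""

-- ===== PORT B =====
def solution_alt (participants : List String) (completions : List String) : String :=
  (participants.find? (fun part =>
    participants.count part != completions.count part)).getD ""

-- ===== PRECONDITION & SPEC =====
-- Pre_ excludes the inputs on which Python A (and Python B) fall through all loops and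
-- return None instead of a string: when every participant's count matches its completion count.
def Pre_solution (participants : List String) (completions : List String) : Prop :=
  ∃ p ∈ participants, participants.count p ≠ completions.count p
instance (participants : List String) (completions : List String) : Decidable (Pre_solution participants completions) := by unfold Pre_solution; infer_instance
def pvWitness_solution : List String × List String := (["leo", "kiki", "eden"], ["eden", "kiki"])

def Spec_solution (participants : List String) (completions : List String) (out : String) : Prop := out = solution_alt participants completions
instance (participants : List String) (completions : List String) (out : String) : Decidable (Spec_solution participants completions out) := by unfold Spec_solution; infer_instance

-- ===== CLAIM (what is proved, stated in full; the proofs are below) =====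
def Claim_equal_solution : Prop := ∀ (participants : List String) (completions : List String), Dom_solution participants completions → Pre_solution participants completions → Spec_solution participants completions (solution participants completions)

-- ===== LEMMAS AND PROOFS =====

-- A's first loop is exactly collections.Counter on participants.
theorem countLoop_eq_counter (participants : List String) :
    participants.foldl (fun d part =>
      if d.contains part = false then d.insert part 1
      else d.insert part (d.getD part 0 + 1)) PySem.Dict.empty
      = PySem.Dict.counter participants := by
  rw [PySem.List.foldl_congr_mem _ _ (fun d x => d.insert x (d.getD x 0 + 1)) _ ?_,
    PySem.Dict.foldl_insert_getD_add_one_eq_counter]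
  intro d x _
  by_cases h : d.contains x = false
  · simp [h, PySem.Dict.getD_of_not_contains d 0 h]
  · simp [h]

-- A's second loop keeps the key list unchanged.
theorem decLoop_keys (completions : List String) (d : PySem.Dict String Int) :
    (completions.foldl (fun d compl =>
      if d.contains compl then d.insert compl (d.getD compl 0 - 1) else d) d).keys = d.keys := by
  induction completions generalizing d with
  | nil => rfl
  | cons c l ih =>
    simp only [List.foldl_cons]
    by_cases h : d.contains c
    · simp [h, ih, PySem.Dict.keys_insert_of_contains d _ h]
    · simp [h, ih]

-- A's second loop subtracts the completion count on keys present, leaves others at default.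
theorem decLoop_getD (completions : List String) (d : PySem.Dict String Int) (k : String) :
    (completions.foldl (fun d compl =>
      if d.contains compl then d.insert compl (d.getD compl 0 - 1) else d) d).getD k 0
      = d.getD k 0 - (if d.contains k then (completions.count k : Int) else 0) := by
  induction completions generalizing d with
  | nil => simp
  | cons c l ih =>
    simp only [List.foldl_cons]
    by_cases hc : d.contains c
    · simp only [hc, if_true]
      rw [ih]
      rw [PySem.Dict.getD_insert, PySem.Dict.contains_insert]
      by_cases hkc : k = c
      · subst hkc
        simp [hc, List.count_cons_self]
        ring
      · have hbeq : (k == c) = false := by simp [hkc]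
        simp [hkc, Ne.symm hkc, hbeq]
    · simp only [hc, if_false, Bool.false_eq_true]
      rw [ih]
      by_cases hk : d.contains k
      · have hkc : k ≠ c := by
          intro h; subst h; simp [hk] at hc
        simp [hk, Ne.symm hkc]
      · simp [hk]

-- find? ignores duplicates removed by Set.ofList (the test depends only on the value).
theorem find?_foldl_add (p : String → Bool) (xs : List String) (s : List String)
    (hs : ∀ x ∈ s, p x = false) :
    List.find? p (xs.foldl PySem.Set.add s) = List.find? p xs := by
  induction xs generalizing s with
  | nil => simpa using List.find?_eq_none.mpr (fun x hx => by simp [hs x hx])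
  | cons x l ih =>
    simp only [List.foldl_cons]
    by_cases hm : x ∈ s
    · have : PySem.Set.add s x = s := by
        simp [PySem.Set.add, PySem.Set.contains, hm]
      rw [this, ih s hs]
      cases hp : p x
      · simp [hp]
      · exact absurd (hs x hm) (by simp [hp])
    · have hadd : PySem.Set.add s x = s ++ [x] := by
        simp [PySem.Set.add, PySem.Set.contains, hm]
      cases hp : p x
      · rw [hadd, ih (s ++ [x]) ?_]
        · simp [hp]
        · intro y hy
          rcases List.mem_append.mp hy with h | h
          · exact hs y h
          · simp at h; subst h; exact hp
      · rw [hadd]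
        have hpre : ∀ (l' : List String) (t : List String), ∃ u, l'.foldl PySem.Set.add t = t ++ u := by
          intro l'
          induction l' with
          | nil => exact fun t => ⟨[], by simp⟩
          | cons a l'' ih' =>
            intro t
            simp only [List.foldl_cons]
            by_cases ha : a ∈ t
            · have : PySem.Set.add t a = t := by simp [PySem.Set.add, PySem.Set.contains, ha]
              rw [this]; exact ih' t
            · have : PySem.Set.add t a = t ++ [a] := by simp [PySem.Set.add, PySem.Set.contains, ha]
              rw [this]
              obtain ⟨u, hu⟩ := ih' (t ++ [a])
              exact ⟨[a] ++ u, by simp [hu]⟩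
        obtain ⟨u, hu⟩ := hpre l (s ++ [x])
        rw [hu]
        rw [List.find?_cons, hp]
        rw [List.append_assoc, List.find?_append, List.find?_eq_none.mpr (fun x hx => by simp [hs x hx])]
        simp [hp]

theorem find?_ofList (p : String → Bool) (xs : List String) :
    List.find? p (PySem.Set.ofList xs) = List.find? p xs := by
  rw [PySem.Set.ofList_eq_foldl]
  exact find?_foldl_add p xs [] (by simp)

-- pointwise-equal tests give the same find? (membership-local version)
theorem find?_congr_mem {α : Type} (l : List α) (p q : α → Bool)
    (h : ∀ x ∈ l, p x = q x) : l.find? p = l.find? q := by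
  induction l with
  | nil => rfl
  | cons x l ih =>
    rw [List.find?_cons, List.find?_cons, h x (by simp)]
    cases q x
    · exact ih fun y hy => h y (by simp [hy])
    · rfl

-- ===== VERDICT (by name: the statement is the Claim_ definition above) =====
theorem solution_spec : Claim_equal_solution := by
  intro participants completions _ _
  unfold Spec_solution solution solution_alt
  simp only [countLoop_eq_counter]
  set m2 := completions.foldl (fun d compl =>
      if d.contains compl then d.insert compl (d.getD compl 0 - 1) else d)
      (PySem.Dict.counter participants) with hm2
  have hkeys : m2.keys = PySem.Set.ofList participants := by
    rw [hm2, decLoop_keys, PySem.Dict.keys_counter]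
  have hnodup : m2.keys.Nodup := by
    rw [hkeys]; exact PySem.Set.nodup_ofList participants
  rw [PySem.Dict.items_eq_map_keys m2 hnodup 0, hkeys, List.find?_map]
  rw [find?_congr_mem _ _ (fun k => (participants.count k : Int) - completions.count k != 0) ?_]
  · rw [find?_ofList]
    rw [find?_congr_mem _ _ (fun part => participants.count part != completions.count part) ?_]
    · cases participants.find? (fun part => participants.count part != completions.count part) <;> simp
    · intro x _
      by_cases h : participants.count x = completions.count x
      · simp [h]
      · have h2 : ((participants.count x : Int) - completions.count x) ≠ 0 :=
          sub_ne_zero.mpr (by exact_mod_cast h)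
        have e1 : ((participants.count x : Int) - completions.count x != 0) = true := by
          simpa using h2
        have e2 : (participants.count x != completions.count x) = true := by simpa using h
        rw [e1]
        exact e2.symm
  · intro k hk
    have hkP : k ∈ participants := (PySem.Set.mem_ofList participants k).mp hk
    have hcont : m2.contains k = true := by
      have : k ∈ m2.keys := by rw [hkeys]; exact hk
      exact (PySem.Dict.contains_iff_mem_keys m2 k).mpr this
    simp only [Function.comp]
    rw [hm2, decLoop_getD, PySem.Dict.getD_counter, PySem.Dict.contains_counter]
    simp [hkP]
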